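-- pv_equiv track=rewrite | github.com/saulhappy/dsa | number_flip.py | number_flip
-- ===== SOURCE A (Python) =====
-- def number_flip(n):
--     new_num = str(n)
--     result = ''
--
--     for i in range(len(new_num)):
--         if new_num[i] == '3':
--             result += new_num[i]
--         if new_num[i] != '3':
--             result += '3' + new_num[i+1:len(new_num)]
--             return int(result)
--     return int(result)
-- ===== SOURCE B (Python) =====
-- def number_flip(n):
--     s = str(n)
--     k = len(s) - len(s.lstrip('3'))   # number of leading '3' characters
--     if k == len(s):                   # every character is '3': nothing to flip
--         return int(s)
--     return int('3' * (k + 1) + s[k + 1:])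
-- ===== Notes on version B (the rewrite author's own statement) =====
-- stated objective: simpler
-- what changed: Replaces A's indexed loop with string accumulator by a closed-form build: count the leading '3's with lstrip, then construct the answer in one concatenation with no loop or early return.
import Mathlib
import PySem

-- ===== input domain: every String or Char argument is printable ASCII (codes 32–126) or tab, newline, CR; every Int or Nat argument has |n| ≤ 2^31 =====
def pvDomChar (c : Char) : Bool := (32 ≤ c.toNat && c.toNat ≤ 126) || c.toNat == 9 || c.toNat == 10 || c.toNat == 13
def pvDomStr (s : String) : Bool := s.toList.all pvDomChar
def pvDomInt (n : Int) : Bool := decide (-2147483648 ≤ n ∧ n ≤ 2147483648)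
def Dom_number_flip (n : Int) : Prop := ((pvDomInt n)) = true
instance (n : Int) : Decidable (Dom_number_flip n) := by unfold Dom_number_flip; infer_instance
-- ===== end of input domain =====

-- B replaces A's indexed loop and accumulator by a closed-form build from the count of leading '3's (simpler).

-- ===== PORT A =====
-- the for-loop over range(len(new_num)) with accumulator `result`;
-- new_num[i+1:len(new_num)] with 0 ≤ i+1 is exactly List.drop (i+1)
def numberFlipLoopA (s : List Char) (i : Nat) (res : List Char) : List Char :=
  if h : i < s.length then
    -- `if new_num[i] == '3'`: append and continue; `if new_num[i] != '3'`: append '3' + rest and return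
    if s[i] = '3' then numberFlipLoopA s (i + 1) (res ++ [s[i]])
    else res ++ '3' :: s.drop (i + 1)
  else res
  termination_by s.length - i

def number_flip (n : Int) : Int :=
  let newNum := PySem.Int.toChars n          -- str(n)
  ((PySem.Int.ofChars? (numberFlipLoopA newNum 0 [])).getD 0)  -- int(result); never a ValueError here

-- ===== PORT B =====
-- lstrip('3') is exactly dropWhile (· = '3'); s[k+1:] with 0 ≤ k+1 is exactly List.drop (k+1)
def number_flip_alt (n : Int) : Int :=
  let s := PySem.Int.toChars n               -- str(n)
  let k := s.length - (s.dropWhile (· = '3')).length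
  if k = s.length then
    (PySem.Int.ofChars? s).getD 0
  else
    (PySem.Int.ofChars? (List.replicate (k + 1) '3' ++ s.drop (k + 1))).getD 0

-- ===== PRECONDITION & SPEC =====
def Spec_number_flip (n : Int) (out : Int) : Prop := out = number_flip_alt n
instance (n : Int) (out : Int) : Decidable (Spec_number_flip n out) := by unfold Spec_number_flip; infer_instance

-- ===== CLAIM (what is proved, stated in full; the proofs are below) =====
def Claim_equal_number_flip : Prop := ∀ (n : Int), Dom_number_flip n → Spec_number_flip n (number_flip n)

-- ===== LEMMAS AND PROOFS =====

-- A's loop, started at index i, appends to res the suffix s.drop i with its first non-'3' replaced by '3'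
theorem numberFlipLoopA_eq (s : List Char) (i : Nat) (res : List Char) :
    numberFlipLoopA s i res =
      res ++ (if (s.drop i).dropWhile (· = '3') = [] then s.drop i
              else (s.drop i).takeWhile (· = '3') ++ '3' :: ((s.drop i).dropWhile (· = '3')).tail) := by
  induction i, res using numberFlipLoopA.induct (s := s) with
  | case1 i res h hc ih =>
    have hd : s.drop i = s[i] :: s.drop (i + 1) := List.drop_eq_getElem_cons h
    rw [numberFlipLoopA, hd]
    rw [hc] at ih
    simp only [h, dif_pos, hc, if_pos, ih, List.dropWhile_cons, List.takeWhile_cons,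
      decide_eq_true_eq]
    split <;> simp
  | case2 i res h hc =>
    have hd : s.drop i = s[i] :: s.drop (i + 1) := List.drop_eq_getElem_cons h
    rw [numberFlipLoopA, hd]
    simp [h, hc, -List.getElem_cons_drop]
  | case3 i res h =>
    rw [numberFlipLoopA]
    simp [h, List.drop_eq_nil_of_le (Nat.le_of_not_lt h)]

theorem takeWhile_eq_replicate (s : List Char) :
    s.takeWhile (· = '3') = List.replicate (s.takeWhile (· = '3')).length '3' := by
  rw [List.eq_replicate_iff]
  refine ⟨rfl, fun c hc => ?_⟩
  have := List.mem_takeWhile_imp hc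
  simpa using this

theorem drop_takeWhile_len (s : List Char) :
    s.drop (s.takeWhile (· = '3')).length = s.dropWhile (· = '3') := by
  induction s with
  | nil => rfl
  | cons c t ih =>
    by_cases hc : c = '3' <;> simp [hc, ih]

-- ===== VERDICT (by name: the statement is the Claim_ definition above) =====
theorem number_flip_spec : Claim_equal_number_flip := by
  intro n _
  unfold Spec_number_flip number_flip number_flip_alt
  simp only [numberFlipLoopA_eq, List.drop_zero, List.nil_append]
  set s := PySem.Int.toChars n with hs
  have hlen : (s.takeWhile (· = '3')).length + (s.dropWhile (· = '3')).length = s.length := by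
    conv_rhs => rw [← List.takeWhile_append_dropWhile (p := (· = '3')) (l := s)]
    rw [List.length_append]
  by_cases hnil : s.dropWhile (· = '3') = []
  · have hk : s.length - (s.dropWhile (· = '3')).length = s.length := by
      rw [hnil]; simp
    rw [if_pos hnil, if_pos hk]
  · have hpos : 0 < (s.dropWhile (· = '3')).length := List.length_pos_of_ne_nil hnil
    have hk : s.length - (s.dropWhile (· = '3')).length = (s.takeWhile (· = '3')).length := by
      omega
    have hne : s.length - (s.dropWhile (· = '3')).length ≠ s.length := by omega
    rw [if_neg hnil, if_neg hne, hk]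
    congr 2
    rw [List.replicate_succ' (n := (s.takeWhile (· = '3')).length)]
    have hdrop : s.drop ((s.takeWhile (· = '3')).length + 1) = (s.dropWhile (· = '3')).tail := by
      rw [← List.tail_drop, drop_takeWhile_len]
    rw [hdrop, ← takeWhile_eq_replicate]
    simp
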